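-- pv_equiv track=rewrite | github.com/ayberk/advent-of-code | 2023/day9.py | process_row2
-- ===== SOURCE A (Python) =====
-- def process_row2(nums):
--   first_cols = []
--   while not all(num == 0 for num in nums):
--     new_rows = []
--     first_cols.append(nums[0])
--     for a, b in zip(nums, nums[1:]):
--       new_rows.append(b - a)
--     nums = new_rows
--   for r in range(len(first_cols)-1, -1, -1):
--     first_cols[r-1] = first_cols[r-1] - first_cols[r]
--   return first_cols[0]
-- ===== SOURCE B (Python) =====
-- def process_row2(nums):
--   # One-pass alternating binomial transform: left extrapolation of the
--   # difference pyramid equals sum_j (-1)^j * C(n, j+1) * nums[j].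
--   n = len(nums)
--   total = 0
--   coeff = n  # C(n, 1)
--   sign = 1
--   for j, a in enumerate(nums):
--     total += sign * coeff * a
--     coeff = coeff * (n - j - 1) // (j + 2)  # C(n, j+2), exact division
--     sign = -sign
--   return total
-- ===== Notes on version B (the rewrite author's own statement) =====
-- stated objective: faster
-- what changed: Replaced the O(n^2) difference-pyramid construction plus backward elimination pass by a single O(n) pass computing the alternating binomial transform sum_j (-1)^j*C(n,j+1)*nums[j] with incrementally updated binomial coefficients.
-- intended difference: On nonempty constant nonzero lists (difference pyramid of depth 1) A's final loop at r=0 writes first_cols[-1] -= first_cols[0] onto the single collected element and returns 0, while B returns the constant nums[0], the correct left extrapolation of a constant sequence. — e.g. on process_row2([7]): A returns 0, B returns 7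
-- outside the precondition, e.g. on process_row2([0]): A raises IndexError, B returns 0
import Mathlib
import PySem

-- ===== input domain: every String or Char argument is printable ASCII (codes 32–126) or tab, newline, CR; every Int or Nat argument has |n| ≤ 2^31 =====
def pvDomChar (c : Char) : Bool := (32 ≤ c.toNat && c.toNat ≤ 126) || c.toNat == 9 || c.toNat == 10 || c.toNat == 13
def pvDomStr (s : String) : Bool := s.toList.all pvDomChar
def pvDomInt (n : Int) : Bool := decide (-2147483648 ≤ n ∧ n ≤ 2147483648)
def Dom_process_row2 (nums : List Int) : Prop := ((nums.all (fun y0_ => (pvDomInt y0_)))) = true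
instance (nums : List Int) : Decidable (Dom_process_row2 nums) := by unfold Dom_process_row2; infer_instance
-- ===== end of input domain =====

-- B replaces A's O(n^2) difference pyramid + backward elimination pass by a one-pass
-- alternating binomial transform of the input (a different, asymptotically smaller algorithm).


-- ===== PORT A =====
-- `while not all(num == 0 for num in nums)`
def pvAllZero (nums : List Int) : Bool := nums.all (fun num => num == 0)

-- inner `for a, b in zip(nums, nums[1:]): new_rows.append(b - a)`
def pvDiffRow (nums : List Int) : List Int :=
  (nums.zip nums.tail).foldl (fun new_rows ab => new_rows ++ [ab.2 - ab.1]) []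

theorem pvFoldlAppMap (xs : List (Int × Int)) (acc : List Int) :
    xs.foldl (fun a p => a ++ [p.2 - p.1]) acc = acc ++ xs.map (fun p => p.2 - p.1) := by
  induction xs generalizing acc <;> simp [*]

theorem pvDiffRow_eq_map (nums : List Int) :
    pvDiffRow nums = (nums.zip nums.tail).map (fun p => p.2 - p.1) := by
  unfold pvDiffRow; rw [pvFoldlAppMap]; simp

theorem pvDiffRow_length (nums : List Int) :
    (pvDiffRow nums).length = nums.length - 1 := by
  simp [pvDiffRow_eq_map]

-- the while loop: each iteration appends nums[0] to first_cols and replaces nums by the diffs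
def pvCollect (nums : List Int) : List Int :=
  if h : pvAllZero nums then []
  else PySem.List.pyGetD nums 0 0 :: pvCollect (pvDiffRow nums)
termination_by nums.length
decreasing_by
  have hne : nums ≠ [] := by intro hh; subst hh; simp [pvAllZero] at h
  have := pvDiffRow_length nums
  have : nums.length ≠ 0 := fun hz => hne (List.eq_nil_of_length_eq_zero hz)
  omega

-- one iteration of `for r in range(len(first_cols)-1, -1, -1)`; pySetD/pyGetD carry
-- Python's negative-index wraparound (exercised at r = 0)
def pvBackStep (l : List Int) (r : Int) : List Int :=
  PySem.List.pySetD l (r - 1)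
    (PySem.List.pyGetD l (r - 1) 0 - PySem.List.pyGetD l r 0)

def process_row2 (nums : List Int) : Int :=
  let fc := pvCollect nums
  let fc2 := (PySem.List.pyRange ((fc.length : Int) - 1) (-1) (-1)).foldl pvBackStep fc
  PySem.List.pyGetD fc2 0 0

-- ===== PORT B =====
-- the `for j, a in enumerate(nums)` loop of Source B, carrying (total, coeff, sign)
def pvBLoop (n : Int) (l : List Int) (j : Nat) (total coeff sign : Int) : Int :=
  match l with
  | [] => total
  | a :: t =>
      pvBLoop n t (j + 1) (total + sign * coeff * a)
        (PySem.Int.floordiv (coeff * (n - (j : Int) - 1)) ((j : Int) + 2)) (-sign)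

def process_row2_alt (nums : List Int) : Int :=
  pvBLoop (nums.length : Int) nums 0 0 (nums.length : Int) 1

-- ===== PRECONDITION & SPEC =====
-- Pre_ excludes exactly the inputs on which A raises IndexError: all-zero lists
-- (including []), where first_cols is empty at the final `first_cols[0]`.
def Pre_process_row2 (nums : List Int) : Prop := ∃ x ∈ nums, x ≠ 0
instance (nums : List Int) : Decidable (Pre_process_row2 nums) := by
  unfold Pre_process_row2; infer_instance
def pvWitness_process_row2 : List Int := [0, 3, 6, 9, 12, 15]

-- On nonempty constant nonzero lists (difference pyramid of depth 1) A's final loop at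
-- r=0 writes first_cols[-1] -= first_cols[0] onto the single collected element and
-- returns 0, while B returns the constant nums[0], the correct left extrapolation.
def D_process_row2 (nums : List Int) : Prop :=
  nums ≠ [] ∧ (∀ x ∈ nums, x = nums.headD 0) ∧ nums.headD 0 ≠ 0
instance (nums : List Int) : Decidable (D_process_row2 nums) := by
  unfold D_process_row2; infer_instance

def Spec_process_row2 (nums : List Int) (out : Int) : Prop :=
  ¬ D_process_row2 nums → out = process_row2_alt nums
instance (nums : List Int) (out : Int) : Decidable (Spec_process_row2 nums out) := by
  unfold Spec_process_row2; infer_instance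

def pvDiffWitness_process_row2 : List Int := [7]
def pvDiffWitnessOut_process_row2 : Int × Int := (0, 7)

-- ===== CLAIM =====
def Claim_unchanged_process_row2 : Prop := ∀ (nums : List Int), Dom_process_row2 nums → Pre_process_row2 nums → Spec_process_row2 nums (process_row2 nums)
def Claim_changed_process_row2 : Prop := Dom_process_row2 (pvDiffWitness_process_row2) ∧ Pre_process_row2 (pvDiffWitness_process_row2) ∧ D_process_row2 (pvDiffWitness_process_row2) ∧ process_row2 (pvDiffWitness_process_row2) = pvDiffWitnessOut_process_row2.1 ∧ process_row2_alt (pvDiffWitness_process_row2) = pvDiffWitnessOut_process_row2.2 ∧ pvDiffWitnessOut_process_row2.1 ≠ pvDiffWitnessOut_process_row2.2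
def Claim_exact_process_row2 : Prop := ∀ (nums : List Int), Dom_process_row2 nums → Pre_process_row2 nums → D_process_row2 nums → process_row2 nums ≠ process_row2_alt nums

-- ===== LEMMAS AND PROOFS =====

def pvS' (n : Nat) (g : Nat → Int) : Int :=
  ∑ k ∈ Finset.range n, (-1 : Int) ^ k * (n.choose (k + 1) : Int) * g k

theorem pascal_sum (m : Nat) (g : Nat → Int) :
    pvS' (m+1) g = g 0 - ∑ j ∈ Finset.range m, (-1 : Int) ^ j * (m.choose (j+1) : Int) * (g (j+1) - g j) := by
  unfold pvS'
  have h1 : ∀ k ∈ Finset.range (m+1), (-1:Int)^k * ((m+1).choose (k+1) : Int) * g k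
      = (-1:Int)^k * (m.choose k : Int) * g k + (-1:Int)^k * (m.choose (k+1) : Int) * g k := by
    intro k _
    have : ((m+1).choose (k+1) : Int) = (m.choose k : Int) + (m.choose (k+1) : Int) := by
      exact_mod_cast congrArg (Nat.cast : Nat → Int) (Nat.choose_succ_succ m k)
    rw [this]; ring
  rw [Finset.sum_congr rfl h1, Finset.sum_add_distrib]
  rw [Finset.sum_range_succ']  -- first sum: peel k=0
  rw [Finset.sum_range_succ]   -- second sum: peel k=m
  have hz : (m.choose (m+1) : Int) = 0 := by simp
  rw [hz]
  have h2 : ∀ j ∈ Finset.range m, (-1:Int)^j * (m.choose (j+1) : Int) * (g (j+1) - g j)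
      = (-1:Int)^j * (m.choose (j+1) : Int) * g (j+1) - (-1:Int)^j * (m.choose (j+1) : Int) * g j := by
    intro j _; ring
  rw [Finset.sum_congr rfl h2, Finset.sum_sub_distrib]
  have h3 : ∀ i ∈ Finset.range m, (-1:Int)^(i+1) * (m.choose (i+1) : Int) * g (i+1)
      = -((-1:Int)^i * (m.choose (i+1) : Int) * g (i+1)) := by
    intro i _; ring
  rw [Finset.sum_congr rfl h3, Finset.sum_neg_distrib]
  simp
  ring

theorem pvBLoop_spec (n : Nat) : ∀ (t : List Int) (j : Nat) (total : Int),
    j + t.length = n →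
    pvBLoop (n : Int) t j total ((n.choose (j+1) : Int)) ((-1 : Int)^j)
      = total + ∑ k ∈ Finset.range t.length, (-1:Int)^(j+k) * (n.choose (j+k+1) : Int) * t.getD k 0 := by
  intro t
  induction t with
  | nil => intro j total _; simp [pvBLoop]
  | cons a t ih =>
    intro j total hj
    have hjn : j + 1 ≤ n := by simp at hj; omega
    rw [pvBLoop]
    have hc : PySem.Int.floordiv ((n.choose (j+1) : Int) * ((n : Int) - (j : Int) - 1)) ((j : Int) + 2)
        = (n.choose (j+2) : Int) := by
      have hsub : (n : Int) - (j : Int) - 1 = ((n - (j+1) : Nat) : Int) := by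
        rw [Nat.cast_sub hjn]; push_cast; ring
      have hch : n.choose (j+1) * (n - (j+1)) = n.choose (j+2) * (j+2) := by
        exact (Nat.choose_succ_right_eq n (j+1)).symm
      rw [hsub]
      have : ((n.choose (j+1) : Int)) * ((n - (j+1) : Nat) : Int) = ((n.choose (j+2) * (j+2) : Nat) : Int) := by
        push_cast; exact_mod_cast congrArg (Nat.cast : Nat → Int) hch
      rw [this]
      have h2 : ((j : Int) + 2) = (((j+2 : Nat)) : Int) := by push_cast; ring
      rw [h2, PySem.Int.floordiv_natCast]
      simp
    have hsign : -(-1:Int)^j = (-1:Int)^(j+1) := by ring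
    rw [hc, hsign]
    rw [ih (j+1) _ (by simp at hj ⊢; omega)]
    rw [List.length_cons, Finset.sum_range_succ']
    simp only [List.getD_cons_succ, List.getD_cons_zero]
    have : ∀ i ∈ Finset.range t.length, (-1:Int)^(j+1+i) * (n.choose (j+1+i+1) : Int) * t.getD i 0
        = (-1:Int)^(j+(i+1)) * (n.choose (j+(i+1)+1) : Int) * t.getD i 0 := by
      intro i _; have e : j+1+i = j+(i+1) := by omega
      rw [e]
    rw [Finset.sum_congr rfl this]
    ring_nf

def pvS (l : List Int) : Int :=
  ∑ k ∈ Finset.range l.length, (-1 : Int) ^ k * (l.length.choose (k + 1) : Int) * l.getD k 0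
def pvAltSum (l : List Int) : Int := l.foldr (fun f x => f - x) 0

theorem pvDiffRow_getD (l : List Int) (j : Nat) (h : j + 1 < l.length) :
    (pvDiffRow l).getD j 0 = l.getD (j+1) 0 - l.getD j 0 := by
  have hlen : j < (pvDiffRow l).length := by rw [pvDiffRow_length]; omega
  rw [pvDiffRow_eq_map] at hlen ⊢
  rw [List.getD_eq_getElem _ _ hlen, List.getElem_map]
  have hz : j < (l.zip l.tail).length := by simpa using hlen
  have h1 : j < l.length := by omega
  have h2 : j < l.tail.length := by simp; omega
  rw [List.getElem_zip]
  rw [List.getD_eq_getElem _ _ h1, List.getD_eq_getElem _ _ h]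
  simp [List.getElem_tail]

theorem pvS_allzero (l : List Int) (h : pvAllZero l = true) : pvS l = 0 := by
  unfold pvS
  apply Finset.sum_eq_zero
  intro k hk
  have hk' : k < l.length := Finset.mem_range.mp hk
  have : l.getD k 0 = 0 := by
    rw [List.getD_eq_getElem _ _ hk']
    have := List.all_eq_true.mp h _ (l.getElem_mem hk')
    simpa using this
  rw [this]; ring

theorem pvS_rec (l : List Int) (h : l ≠ []) :
    pvS l = l.getD 0 0 - pvS (pvDiffRow l) := by
  obtain ⟨m, hm⟩ : ∃ m, l.length = m + 1 := by
    cases l with | nil => simp at h | cons a t => exact ⟨t.length, by simp⟩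
  have hd : (pvDiffRow l).length = m := by rw [pvDiffRow_length, hm]; omega
  unfold pvS
  rw [hm, hd]
  have hp := pascal_sum m (fun k => l.getD k 0)
  unfold pvS' at hp
  rw [hp]
  congr 1
  apply Finset.sum_congr rfl
  intro j hj
  have hj' : j + 1 < l.length := by rw [hm]; exact Nat.add_lt_add_right (Finset.mem_range.mp hj) 1
  rw [pvDiffRow_getD l j hj']

-- constancy characterisation
theorem pvDiffRow_cons (a b : Int) (t : List Int) :
    pvDiffRow (a :: b :: t) = (b - a) :: pvDiffRow (b :: t) := by
  simp [pvDiffRow_eq_map]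

theorem pvAllZero_diff_iff (l : List Int) :
    pvAllZero (pvDiffRow l) = true ↔ ∀ x ∈ l, x = l.headD 0 := by
  induction l with
  | nil => simp [pvDiffRow, pvAllZero]
  | cons a t ih =>
    cases t with
    | nil => simp [pvDiffRow, pvAllZero]
    | cons b t' =>
      rw [pvDiffRow_cons]
      constructor
      · intro hz x hx
        have h1 : b - a = 0 ∧ pvAllZero (pvDiffRow (b :: t')) = true := by
          simpa [pvAllZero] using hz
        have hba : b = a := by omega
        have := ih.mp h1.2
        simp only [List.headD_cons] at this ⊢
        rcases List.mem_cons.mp hx with hx | hx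
        · omega
        · have := this x hx; omega
      · intro hc
        have hba : b = a := by
          have := hc b (by simp); simpa using this
        have : ∀ x ∈ b :: t', x = (b :: t').headD 0 := by
          intro x hx
          have := hc x (List.mem_cons_of_mem a hx)
          simp at this ⊢; omega
        have h2 := ih.mpr this
        simp [pvAllZero] at h2 ⊢
        exact ⟨by omega, h2⟩

theorem pvCollect_unfold (nums : List Int) :
    pvCollect nums = if pvAllZero nums then []
      else PySem.List.pyGetD nums 0 0 :: pvCollect (pvDiffRow nums) := by
  rw [pvCollect]; split <;> simp_all

theorem pvAltSum_collect (n : Nat) : ∀ l : List Int, l.length ≤ n →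
    pvAltSum (pvCollect l) = pvS l := by
  induction n with
  | zero =>
    intro l hl
    have : l = [] := List.eq_nil_of_length_eq_zero (by omega)
    subst this
    simp [pvCollect_unfold, pvAllZero, pvAltSum, pvS]
  | succ n ih =>
    intro l hl
    rw [pvCollect_unfold]
    by_cases hz : pvAllZero l
    · rw [if_pos hz]
      rw [pvS_allzero l hz]
      simp [pvAltSum]
    · rw [if_neg hz]
      have hne : l ≠ [] := by intro hh; subst hh; simp [pvAllZero] at hz
      have hlen : (pvDiffRow l).length ≤ n := by
        have := pvDiffRow_length l
        have : l.length ≠ 0 := fun h0 => hne (List.eq_nil_of_length_eq_zero h0)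
        omega
      have hstep : pvAltSum (PySem.List.pyGetD l 0 0 :: pvCollect (pvDiffRow l))
          = PySem.List.pyGetD l 0 0 - pvAltSum (pvCollect (pvDiffRow l)) := rfl
      rw [hstep, ih _ hlen, PySem.List.pyGetD_zero, ← pvS_rec l hne]

-- drop (k-1) head recurrence
theorem pvAltSum_drop (fc : List Int) (k : Nat) (h : k < fc.length) :
    pvAltSum (fc.drop k) = fc[k] - pvAltSum (fc.drop (k+1)) := by
  rw [List.drop_eq_getElem_cons h]
  rfl

-- range peel on the right: pyRange (m-1) (k-1) (-1) = pyRange (m-1) k (-1) ++ [k]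
theorem pyRange_neg_one_peel (a k : Int) (h : k ≤ a) :
    PySem.List.pyRange a (k-1) (-1) = PySem.List.pyRange a k (-1) ++ [k] := by
  rw [PySem.List.pyRange_neg_one_eq_reverse, PySem.List.pyRange_neg_one_eq_reverse]
  have : k - 1 + 1 = k := by ring
  rw [this]
  rw [PySem.List.pyRange_one_cons (by omega : k < a + 1)]
  simp

theorem back_inv (fc : List Int) : ∀ (d k : Nat), 1 ≤ k → k + d = fc.length →
    (PySem.List.pyRange ((fc.length : Int) - 1) ((k : Int) - 1) (-1)).foldl pvBackStep fc
    = fc.take (k-1) ++ (List.range' (k-1) (d+1)).map (fun j => pvAltSum (fc.drop j)) := by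
  intro d
  induction d with
  | zero =>
    intro k hk1 hkm
    have hm : k = fc.length := by omega
    have hnil : PySem.List.pyRange ((fc.length : Int) - 1) ((k : Int) - 1) (-1) = [] := by
      apply PySem.List.pyRange_neg_one_eq_nil
      omega
    rw [hnil]
    simp only [List.foldl_nil]
    have hr1 : List.range' (k-1) (0+1) = [k-1] := by simp
    rw [hr1, List.map_cons, List.map_nil]
    have hlt : k - 1 < fc.length := by omega
    rw [pvAltSum_drop fc (k-1) hlt]
    have : fc.drop (k-1+1) = [] := by
      apply List.drop_eq_nil_of_le; omega
    rw [this]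
    have : pvAltSum [] = 0 := rfl
    rw [this]
    have htake : fc.take (k-1) ++ [fc[k-1]] = fc.take k := by
      have h0 := List.take_concat_get (by omega : k - 1 < fc.length) (l := fc)
      rw [List.concat_eq_append] at h0
      rw [h0]; congr 1; omega
    rw [sub_zero, htake, List.take_of_length_le (by omega)]
  | succ d ih =>
    intro k hk1 hkm
    have hklt : k < fc.length := by omega
    -- split off the last iteration r = k
    have hsplit : PySem.List.pyRange ((fc.length : Int) - 1) ((k : Int) - 1) (-1)
        = PySem.List.pyRange ((fc.length : Int) - 1) (k : Int) (-1) ++ [(k : Int)] := by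
      exact pyRange_neg_one_peel _ _ (by push_cast; omega)
    have hIH := ih (k+1) (by omega) (by omega)
    have hcast : ((k : Int) + 1 - 1) = ((k : Int)) := by ring
    rw [hsplit, List.foldl_append]
    have hIH' : (PySem.List.pyRange ((fc.length : Int) - 1) ((k : Int)) (-1)).foldl pvBackStep fc
        = fc.take k ++ (List.range' k (d+1)).map (fun j => pvAltSum (fc.drop j)) := by
      have e1 : ((k+1 : Nat) : Int) - 1 = (k : Int) := by push_cast; ring
      rw [← e1]
      simpa using hIH
    rw [hIH']
    -- now apply pvBackStep with r = k
    set L := fc.take k ++ (List.range' k (d+1)).map (fun j => pvAltSum (fc.drop j)) with hL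
    have hLlen : L.length = fc.length := by
      simp [hL]; omega
    have hkm1 : (k : Int) - 1 = ((k - 1 : Nat) : Int) := by push_cast [Nat.cast_sub hk1]; ring
    have hget1 : PySem.List.pyGetD L ((k : Int) - 1) 0 = fc[k-1] := by
      rw [hkm1, PySem.List.pyGetD_natCast]
      have h1 : k - 1 < (fc.take k).length := by simp; omega
      rw [List.getD_append _ _ _ _ (by simpa using h1)]
      rw [List.getD_eq_getElem _ _ h1, List.getElem_take]
    have hget2 : PySem.List.pyGetD L ((k : Int)) 0 = pvAltSum (fc.drop k) := by
      rw [PySem.List.pyGetD_natCast]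
      have h1 : (fc.take k).length = k := by simp; omega
      rw [hL]
      rw [List.getD_append_right _ _ _ _ (by omega)]
      rw [h1]
      simp [List.range'_succ]
    simp only [List.foldl_cons, List.foldl_nil, pvBackStep]
    rw [hget1, hget2, hkm1, PySem.List.pySetD_natCast]
    rw [hL]
    -- set at index k-1
    have hvalue : fc[k-1] - pvAltSum (fc.drop k) = pvAltSum (fc.drop (k-1)) := by
      have := pvAltSum_drop fc (k-1) (by omega)
      have e : k - 1 + 1 = k := by omega
      rw [e] at this
      omega
    have htk : fc.take k = fc.take (k-1) ++ [fc[k-1]] := by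
      have h0 := List.take_concat_get (by omega : k - 1 < fc.length) (l := fc)
      rw [List.concat_eq_append] at h0
      rw [h0]; congr 1; omega
    rw [htk]
    rw [List.append_assoc]
    rw [List.set_append_right _ _ (by simp : (fc.take (k-1)).length ≤ k - 1)]
    have hsetidx : k - 1 - (fc.take (k-1)).length = 0 := by simp; omega
    rw [hsetidx]
    simp only [List.set_cons_zero, List.singleton_append]  -- ([x] ++ rest).set 0 v
    rw [hvalue]
    congr 1
    have : List.range' (k-1) (d+1+1) = (k-1) :: List.range' k (d+1) := by
      have e : k - 1 + 1 = k := by omega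
      rw [List.range'_succ, e]
    rw [this, List.map_cons]

theorem pySetD_neg_one (l : List Int) (h : l ≠ []) (v : Int) :
    PySem.List.pySetD l (-1) v = l.set (l.length - 1) v := by
  have h1 : 1 ≤ l.length := by
    cases l with | nil => simp at h | cons a t => simp
  simp [PySem.List.pySetD, PySem.List.pySet?, PySem.List.pyIdx?, h1]

theorem pvA_result (nums : List Int) (hm : 1 ≤ (pvCollect nums).length) :
    process_row2 nums = if (pvCollect nums).length = 1 then 0
      else pvAltSum (pvCollect nums) := by
  have hdef : process_row2 nums = PySem.List.pyGetD
      ((PySem.List.pyRange (((pvCollect nums).length : Int) - 1) (-1) (-1)).foldl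
        pvBackStep (pvCollect nums)) 0 0 := rfl
  rw [hdef]
  set fc := pvCollect nums with hfc
  set m := fc.length with hmdef
  -- split the final r = 0 iteration
  have hsplit : PySem.List.pyRange ((m : Int) - 1) (-1) (-1)
      = PySem.List.pyRange ((m : Int) - 1) 0 (-1) ++ [(0 : Int)] := by
    have h0 : (-1 : Int) = (0 : Int) - 1 := by ring
    rw [h0]
    exact pyRange_neg_one_peel _ 0 (by omega)
  have hbi := back_inv fc (m - 1) 1 (by omega) (by omega)
  have e1 : ((1 : Nat) : Int) - 1 = (0 : Int) := by simp
  rw [e1] at hbi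
  have e2 : m - 1 + 1 = m := by omega
  simp only [Nat.sub_self, List.take_zero, List.nil_append, e2] at hbi
  set g : Nat → Int := fun j => pvAltSum (fc.drop j) with hg
  set L := (List.range' 0 m).map g with hLdef
  rw [hsplit, List.foldl_append, hbi]
  simp only [List.foldl_cons, List.foldl_nil, pvBackStep]
  have hLlen : L.length = m := by simp [hLdef]
  have hLne : L ≠ [] := by
    intro hh; rw [hh] at hLlen; simp at hLlen; omega
  have hrange : List.range' 0 m = 0 :: List.range' 1 (m-1) := by
    obtain ⟨m', hm'⟩ : ∃ m', m = m' + 1 := ⟨m - 1, by omega⟩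
    rw [hm', List.range'_succ]
    simp
  have hget0 : PySem.List.pyGetD L 0 0 = pvAltSum fc := by
    rw [PySem.List.pyGetD_zero, hLdef, hrange]
    simp [hg]
  have hgetlast : L.getLast hLne = L.getD (L.length - 1) 0 := by
    rw [List.getLast_eq_getElem, List.getD_eq_getElem _ _ (by omega)]
  have hgetneg : PySem.List.pyGetD L ((0:Int) - 1) 0 = L.getD (L.length - 1) 0 := by
    have he : (0 : Int) - 1 = -1 := by ring
    rw [he, PySem.List.pyGetD_neg_one L 0 hLne, hgetlast]
  have hsetneg : PySem.List.pySetD L ((0:Int) - 1) (PySem.List.pyGetD L ((0:Int)-1) 0 - PySem.List.pyGetD L 0 0)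
      = L.set (L.length - 1) (L.getD (L.length - 1) 0 - pvAltSum fc) := by
    rw [hget0, hgetneg]
    have he : (0 : Int) - 1 = -1 := by ring
    rw [he, pySetD_neg_one L hLne _]
  rw [hsetneg]
  by_cases hm1 : m = 1
  · rw [if_pos (by omega)]
    have hL1 : L = [pvAltSum fc] := by
      rw [hLdef, hm1]
      simp [hg]
    rw [hL1]
    simp
  · rw [if_neg (by omega)]
    rw [PySem.List.pyGetD_zero]
    have hne0 : L.length - 1 ≠ 0 := by omega
    rw [List.getD_eq_getElem _ _ (by simp; omega)]
    rw [List.getElem_set_ne (by omega)]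
    have : L[0]'(by omega) = pvAltSum fc := by
      have := hget0
      rw [PySem.List.pyGetD_zero, List.getD_eq_getElem _ _ (by omega)] at this
      exact this
    exact this


theorem pvAllZero_false (l : List Int) (h : ∃ x ∈ l, x ≠ 0) : pvAllZero l = false := by
  obtain ⟨x, hx, hne⟩ := h
  simp [pvAllZero]
  exact ⟨x, hx, hne⟩

theorem pvB_eq_S (l : List Int) :
    pvBLoop (l.length : Int) l 0 0 (l.length : Int) 1 = pvS l := by
  have h := pvBLoop_spec l.length l 0 0 (by omega)
  rw [Nat.choose_one_right, pow_zero] at h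
  rw [h, zero_add]
  unfold pvS
  apply Finset.sum_congr rfl
  intro k _
  simp

theorem pvA_full (nums : List Int) (hpre : ∃ x ∈ nums, x ≠ 0) (hnd : pvAllZero (pvDiffRow nums) = false) :
    process_row2 nums = pvS nums := by
  have hz := pvAllZero_false nums hpre
  have hcu := pvCollect_unfold nums
  rw [if_neg (by simp [hz])] at hcu
  have hcu2 := pvCollect_unfold (pvDiffRow nums)
  rw [if_neg (by simp [hnd])] at hcu2
  have hlen : 2 ≤ (pvCollect nums).length := by
    rw [hcu, hcu2]; simp
  rw [pvA_result nums (by omega), if_neg (by omega)]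
  exact pvAltSum_collect nums.length nums (le_refl _)

theorem pvA_const (nums : List Int) (hD : nums ≠ [] ∧ (∀ x ∈ nums, x = nums.headD 0) ∧ nums.headD 0 ≠ 0) :
    process_row2 nums = 0 := by
  obtain ⟨hne, hconst, hh0⟩ := hD
  have hz : pvAllZero nums = false := by
    apply pvAllZero_false
    cases nums with
    | nil => simp at hne
    | cons a t => exact ⟨a, by simp, by simpa using hh0⟩
  have hz2 : pvAllZero (pvDiffRow nums) = true := (pvAllZero_diff_iff nums).mpr hconst
  have hcu := pvCollect_unfold nums
  rw [if_neg (by simp [hz])] at hcu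
  have hcu2 := pvCollect_unfold (pvDiffRow nums)
  rw [if_pos hz2] at hcu2
  rw [hcu2] at hcu
  have hlen : (pvCollect nums).length = 1 := by rw [hcu]; simp
  rw [pvA_result nums (by omega), if_pos hlen]

theorem pvB_const (nums : List Int) (hD : nums ≠ [] ∧ (∀ x ∈ nums, x = nums.headD 0) ∧ nums.headD 0 ≠ 0) :
    pvBLoop (nums.length : Int) nums 0 0 (nums.length : Int) 1 = nums.headD 0 := by
  obtain ⟨hne, hconst, hh0⟩ := hD
  have hz2 : pvAllZero (pvDiffRow nums) = true := (pvAllZero_diff_iff nums).mpr hconst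
  have hz : pvAllZero nums = false := by
    apply pvAllZero_false
    cases nums with
    | nil => simp at hne
    | cons a t => exact ⟨a, by simp, by simpa using hh0⟩
  rw [pvB_eq_S]
  have := pvAltSum_collect nums.length nums (le_refl _)
  rw [← this]
  have hcu := pvCollect_unfold nums
  rw [if_neg (by simp [hz])] at hcu
  have hcu2 := pvCollect_unfold (pvDiffRow nums)
  rw [if_pos hz2] at hcu2
  rw [hcu2] at hcu
  rw [hcu]
  have : pvAltSum [PySem.List.pyGetD nums 0 0] = PySem.List.pyGetD nums 0 0 := by
    simp [pvAltSum]
  rw [this, PySem.List.pyGetD_zero]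
  cases nums with
  | nil => simp at hne
  | cons a t => simp


-- ===== VERDICT (by name: the statements are the Claim_ definitions above) =====
theorem process_row2_spec : Claim_unchanged_process_row2 := by
  intro nums _ hpre hnd
  have hz2 : pvAllZero (pvDiffRow nums) = false := by
    by_contra hcon
    have ht : pvAllZero (pvDiffRow nums) = true := by
      revert hcon; cases pvAllZero (pvDiffRow nums) <;> simp
    have hconst := (pvAllZero_diff_iff nums).mp ht
    apply hnd
    refine ⟨?_, hconst, ?_⟩
    · obtain ⟨x, hx, _⟩ := hpre; intro hh; subst hh; simp at hx
    · obtain ⟨x, hx, hne⟩ := hpre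
      have hxh := hconst x hx
      intro h0; exact hne (by rw [hxh, h0])
  show process_row2 nums = process_row2_alt nums
  unfold process_row2_alt
  rw [pvB_eq_S, ← pvA_full nums hpre hz2]

theorem process_row2_changed : Claim_changed_process_row2 := by
  unfold Claim_changed_process_row2
  refine ⟨by decide, by decide, by decide, ?_, by decide, by decide⟩
  show process_row2 [7] = 0
  exact pvA_const [7] ⟨by simp, by simp, by simp⟩

theorem process_row2_tight : Claim_exact_process_row2 := by
  intro nums _ _ hD
  have hD' : nums ≠ [] ∧ (∀ x ∈ nums, x = nums.headD 0) ∧ nums.headD 0 ≠ 0 := hD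
  have hA := pvA_const nums hD'
  have hB := pvB_const nums hD'
  show process_row2 nums ≠ process_row2_alt nums
  unfold process_row2_alt
  rw [hA, hB]
  exact fun h => hD'.2.2 h.symm
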